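-- pv_equiv track=rewrite | github.com/Sheel-ui/Analysis-of-Algorithms | Project II/app.py | alg2
-- ===== SOURCE A (Python) =====
-- def alg2(matrix, h):
--     rows, cols = len(matrix), len(matrix[0]) if len(matrix) > 0 else 0
--     maxSquareSize = 0
--     i1, j1, i2, j2 = None, None, None, None
--     for i in range(rows):
--         for j in range(cols):
--             # above two for loops for selecting element in matrix
--             if matrix[i][j] >= h:
--                 squareSize = 1
--                 flag = True
--                 while squareSize + i < rows and squareSize + j < cols and flag:
--                     # above while loop for incrementing diagonal element
--                     for k in range(j, squareSize + j + 1):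
--                         # above for loop for checking every element in a column including diagonal element
--                         if matrix[i + squareSize][k] < h:
--                             flag = False
--                     for k in range(i, squareSize + i + 1):
--                         # above for loop for checking every element in a row including diagonal element
--                         if matrix[k][j + squareSize] < h:
--                             flag = False
--                     if flag:
--                         squareSize += 1
--                 if squareSize >= maxSquareSize:
--                     maxSquareSize = squareSize
--                     i1, j1 = i+1, j+1
--                     i2, j2 = i+maxSquareSize, j+maxSquareSize
--     return i1, j1, i2, j2
-- ===== SOURCE B (Python) =====
-- def alg2(matrix, h):
--     rows = len(matrix)
--     cols = len(matrix[0]) if rows > 0 else 0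
--     # dp[i][j] = side of the largest all->=h square whose top-left corner is (i, j),
--     # computed bottom-up / right-to-left from the three neighbours (maximal-square DP).
--     nxt = [0] * (cols + 1)
--     dp = []
--     for i in range(rows - 1, -1, -1):
--         row = matrix[i]
--         cur = [0] * (cols + 1)
--         for j in range(cols - 1, -1, -1):
--             if row[j] >= h:
--                 cur[j] = 1 + min(nxt[j], cur[j + 1], nxt[j + 1])
--         dp.append(cur)
--         nxt = cur
--     dp.reverse()
--     best = 0
--     i1 = j1 = i2 = j2 = None
--     for i in range(rows):
--         for j in range(cols):
--             s = dp[i][j]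
--             if s > 0 and s >= best:
--                 best = s
--                 i1, j1, i2, j2 = i + 1, j + 1, i + best, j + best
--     return i1, j1, i2, j2
-- ===== Notes on version B (the rewrite author's own statement) =====
-- stated objective: alternative
-- what changed: Replaced the per-cell greedy square expansion with repeated border rescans by the classic maximal-square dynamic programme: one bottom-up pass computes for every cell the side of the largest qualifying square anchored there from its three neighbours, then one row-major scan picks the last maximal corner exactly as A does.
import Mathlib
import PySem

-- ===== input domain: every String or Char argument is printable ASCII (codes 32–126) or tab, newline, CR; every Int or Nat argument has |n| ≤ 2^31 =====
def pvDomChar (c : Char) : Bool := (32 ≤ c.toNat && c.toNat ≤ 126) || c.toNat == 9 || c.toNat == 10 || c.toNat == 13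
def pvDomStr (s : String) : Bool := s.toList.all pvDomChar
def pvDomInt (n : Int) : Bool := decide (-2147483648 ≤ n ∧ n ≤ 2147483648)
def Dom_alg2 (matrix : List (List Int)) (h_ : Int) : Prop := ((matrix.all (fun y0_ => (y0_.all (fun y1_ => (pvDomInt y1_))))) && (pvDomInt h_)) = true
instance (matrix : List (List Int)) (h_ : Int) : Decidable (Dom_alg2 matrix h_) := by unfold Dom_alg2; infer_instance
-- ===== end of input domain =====

-- B replaces A's per-cell greedy square expansion with border rescans by the maximal-square
-- dynamic programme: one bottom-up pass over the matrix, then one row-major scan with A's tie-breaking.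

-- ===== PORT A =====
-- matrix[i][j]; under Pre_alg2 every access A performs has 0 ≤ index < length, where pyGetD is exact.
def entA (m : List (List Int)) (i j : Int) : Int :=
  PySem.List.pyGetD (PySem.List.pyGetD m i []) j 0

-- the 'while squareSize + i < rows and … and flag' loop of A, with its two border-checking for-loops
def alg2Loop (m : List (List Int)) (h_ rows cols i j : Int) (squareSize : Int) (flag : Bool) : Int :=
  if hc : squareSize + i < rows ∧ squareSize + j < cols ∧ flag = true then
    let f1 := (PySem.List.pyRange j (squareSize + j + 1) 1).foldl
                (fun f k => if entA m (i + squareSize) k < h_ then false else f) flag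
    let f2 := (PySem.List.pyRange i (squareSize + i + 1) 1).foldl
                (fun f k => if entA m k (j + squareSize) < h_ then false else f) f1
    if f2 then alg2Loop m h_ rows cols i j (squareSize + 1) f2
    else squareSize   -- flag is now False: the next while-test fails, squareSize is returned
  else squareSize
termination_by (rows - (squareSize + i)).toNat
decreasing_by omega

def alg2 (matrix : List (List Int)) (h_ : Int) : List (Option Int) :=
  let rows : Int := matrix.length
  let cols : Int := if 0 < matrix.length then ((matrix.headD []).length : Int) else 0
  let st :=
    (PySem.List.pyRange 0 rows 1).foldl (fun st i =>
      (PySem.List.pyRange 0 cols 1).foldl (fun st j =>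
        if h_ ≤ entA matrix i j then
          let squareSize := alg2Loop matrix h_ rows cols i j 1 true
          if st.1 ≤ squareSize then
            (squareSize, some (i+1), some (j+1), some (i+squareSize), some (j+squareSize))
          else st
        else st) st) ((0 : Int), (none : Option Int), (none : Option Int), (none : Option Int), (none : Option Int))
  [st.2.1, st.2.2.1, st.2.2.2.1, st.2.2.2.2]

-- ===== PORT B =====
-- one dp row cur[j..cols] from the row below (nxt): cur[j] = 1 + min(nxt[j], cur[j+1], nxt[j+1])
-- when row[j] >= h, else 0; row.getD is exact under Pre_ (indices are in range).
def buildRow (h_ : Int) (row nxt : List Int) (cols : Nat) (j : Nat) : List Int :=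
  if hj : j < cols then
    let rest := buildRow h_ row nxt cols (j+1)
    (if h_ ≤ row.getD j 0 then
       1 + min (nxt.getD j 0) (min (rest.headD 0) (nxt.getD (j+1) 0))
     else 0) :: rest
  else [0]
termination_by cols - j

def alg2_alt (matrix : List (List Int)) (h_ : Int) : List (Option Int) :=
  let rows : Int := matrix.length
  let cols : Int := if 0 < matrix.length then ((matrix.headD []).length : Int) else 0
  let dp : List (List Int) :=
    matrix.foldr (fun row acc =>
      buildRow h_ row (acc.headD (List.replicate (cols.toNat + 1) 0)) cols.toNat 0 :: acc) []
  let st :=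
    (PySem.List.pyRange 0 rows 1).foldl (fun st i =>
      (PySem.List.pyRange 0 cols 1).foldl (fun st j =>
        let s := PySem.List.pyGetD (PySem.List.pyGetD dp i []) j 0
        if 0 < s ∧ st.1 ≤ s then
          (s, some (i+1), some (j+1), some (i+s), some (j+s))
        else st) st) ((0 : Int), (none : Option Int), (none : Option Int), (none : Option Int), (none : Option Int))
  [st.2.1, st.2.2.1, st.2.2.2.1, st.2.2.2.2]

-- ===== PRECONDITION & SPEC =====
-- Pre_ excludes matrices with a row shorter than row 0: A reads matrix[i][j] for every j below
-- row 0's width, so it raises IndexError on every such input (the ports' getD defaults are exact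
-- only inside Pre_).
def Pre_alg2 (matrix : List (List Int)) (h_ : Int) : Prop :=
  ∀ row ∈ matrix, (matrix.headD []).length ≤ row.length
instance (matrix : List (List Int)) (h_ : Int) : Decidable (Pre_alg2 matrix h_) := by
  unfold Pre_alg2; infer_instance

def pvWitness_alg2 : List (List Int) × Int := ([[1, 2], [3, 4]], 2)

def Spec_alg2 (matrix : List (List Int)) (h_ : Int) (out : List (Option Int)) : Prop := out = alg2_alt matrix h_
instance (matrix : List (List Int)) (h_ : Int) (out : List (Option Int)) : Decidable (Spec_alg2 matrix h_ out) := by unfold Spec_alg2; infer_instance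

-- ===== CLAIM (what is proved, stated in full; the proofs are below) =====
def Claim_equal_alg2 : Prop := ∀ (matrix : List (List Int)) (h_ : Int), Dom_alg2 matrix h_ → Pre_alg2 matrix h_ → Spec_alg2 matrix h_ (alg2 matrix h_)

-- ===== LEMMAS AND PROOFS =====

-- the side of the largest all-≥h square with top-left corner (i, j) inside the rows×cols box
def Mside (m : List (List Int)) (h_ rows cols i j : Int) : Int :=
  if hc : i < rows ∧ j < cols then
    if h_ ≤ entA m i j then
      1 + min (Mside m h_ rows cols (i+1) j)
              (min (Mside m h_ rows cols i (j+1)) (Mside m h_ rows cols (i+1) (j+1)))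
    else 0
  else 0
termination_by ((rows - i).toNat + (cols - j).toNat)
decreasing_by all_goals omega

-- the square of side s with top-left (i, j) is entirely ≥ h
def Good (m : List (List Int)) (h_ i j s : Int) : Prop :=
  ∀ a b : Int, 0 ≤ a → a < s → 0 ≤ b → b < s → h_ ≤ entA m (i+a) (j+b)

theorem headD_eq_getD_zero {α : Type} (l : List α) (d : α) : l.headD d = l.getD 0 d := by
  cases l <;> rfl

theorem foldl_ifFalse_false {α : Type} (p : α → Prop) [DecidablePred p] (l : List α) :
    l.foldl (fun f k => if p k then false else f) false = false := by
  induction l with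
  | nil => rfl
  | cons x xs ih => simp only [List.foldl_cons]; split <;> exact ih

theorem foldl_ifFalse_iff {α : Type} (p : α → Prop) [DecidablePred p] (l : List α) (b : Bool) :
    (l.foldl (fun f k => if p k then false else f) b = true) ↔ (b = true ∧ ∀ k ∈ l, ¬ p k) := by
  induction l generalizing b with
  | nil => simp
  | cons x xs ih =>
    simp only [List.foldl_cons, List.mem_cons]
    by_cases hp : p x
    · simp only [if_pos hp, foldl_ifFalse_false]
      constructor
      · intro hf; simp at hf
      · rintro ⟨-, hall⟩; exact absurd hp (hall x (Or.inl rfl))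
    · simp only [if_neg hp]
      rw [ih]
      constructor
      · rintro ⟨hb, hall⟩
        refine ⟨hb, ?_⟩
        rintro k (rfl | hk)
        · exact hp
        · exact hall k hk
      · rintro ⟨hb, hall⟩
        exact ⟨hb, fun k hk => hall k (Or.inr hk)⟩

theorem Mside_nonneg (m : List (List Int)) (h_ rows cols i j : Int) :
    0 ≤ Mside m h_ rows cols i j := by
  induction i, j using Mside.induct m h_ rows cols with
  | case1 i j hc hcell ih1 ih2 ih3 =>
    rw [Mside, dif_pos hc, if_pos hcell]
    have := min_le_left (Mside m h_ rows cols (i+1) j)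
      (min (Mside m h_ rows cols i (j+1)) (Mside m h_ rows cols (i+1) (j+1)))
    omega
  | case2 i j hc hcell => rw [Mside, dif_pos hc, if_neg hcell]
  | case3 i j hc => rw [Mside, dif_neg hc]

theorem Mside_le_rows (m : List (List Int)) (h_ rows cols i j : Int) (hi : i ≤ rows) :
    Mside m h_ rows cols i j ≤ rows - i := by
  induction i, j using Mside.induct m h_ rows cols with
  | case1 i j hc hcell ih1 ih2 ih3 =>
    rw [Mside, dif_pos hc, if_pos hcell]
    have h1 := ih1 (by omega)
    have := min_le_left (Mside m h_ rows cols (i+1) j)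
      (min (Mside m h_ rows cols i (j+1)) (Mside m h_ rows cols (i+1) (j+1)))
    omega
  | case2 i j hc hcell => rw [Mside, dif_pos hc, if_neg hcell]; omega
  | case3 i j hc => rw [Mside, dif_neg hc]; omega

theorem Mside_le_cols (m : List (List Int)) (h_ rows cols i j : Int) (hj : j ≤ cols) :
    Mside m h_ rows cols i j ≤ cols - j := by
  induction i, j using Mside.induct m h_ rows cols with
  | case1 i j hc hcell ih1 ih2 ih3 =>
    rw [Mside, dif_pos hc, if_pos hcell]
    have h2 := ih2 (by omega)
    have ha := min_le_left (Mside m h_ rows cols i (j+1)) (Mside m h_ rows cols (i+1) (j+1))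
    have hb := min_le_right (Mside m h_ rows cols (i+1) j)
      (min (Mside m h_ rows cols i (j+1)) (Mside m h_ rows cols (i+1) (j+1)))
    omega
  | case2 i j hc hcell => rw [Mside, dif_pos hc, if_neg hcell]; omega
  | case3 i j hc => rw [Mside, dif_neg hc]; omega

theorem Good_mono (m : List (List Int)) (h_ i j s t : Int) (hts : t ≤ s)
    (hg : Good m h_ i j s) : Good m h_ i j t := by
  intro a b ha has hb hbs; exact hg a b ha (by omega) hb (by omega)

theorem Good_succ_iff (m : List (List Int)) (h_ i j s : Int) (hs : 0 ≤ s) :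
    Good m h_ i j (s+1) ↔
      (h_ ≤ entA m i j ∧ Good m h_ (i+1) j s ∧ Good m h_ i (j+1) s ∧ Good m h_ (i+1) (j+1) s) := by
  constructor
  · intro hg
    refine ⟨by simpa using hg 0 0 le_rfl (by omega) le_rfl (by omega), ?_, ?_, ?_⟩
    · intro a b ha has hb hbs
      have e : i + (a + 1) = i + 1 + a := by ring
      have := hg (a+1) b (by omega) (by omega) hb (by omega)
      rwa [e] at this
    · intro a b ha has hb hbs
      have e : j + (b + 1) = j + 1 + b := by ring
      have := hg a (b+1) ha (by omega) (by omega) (by omega)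
      rwa [e] at this
    · intro a b ha has hb hbs
      have e1 : i + (a + 1) = i + 1 + a := by ring
      have e2 : j + (b + 1) = j + 1 + b := by ring
      have := hg (a+1) (b+1) (by omega) (by omega) (by omega) (by omega)
      rwa [e1, e2] at this
  · rintro ⟨hcell, hd, hr, hdg⟩ a b ha has hb hbs
    by_cases ha0 : a = 0
    · subst ha0
      by_cases hb0 : b = 0
      · subst hb0; simpa using hcell
      · have := hr 0 (b-1) le_rfl (by omega) (by omega) (by omega)
        have e : j + 1 + (b - 1) = j + b := by ring
        rw [e] at this; simpa using this
    · by_cases hb0 : b = 0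
      · subst hb0
        have := hd (a-1) 0 (by omega) (by omega) le_rfl (by omega)
        have e : i + 1 + (a - 1) = i + a := by ring
        rw [e] at this; simpa using this
      · have := hdg (a-1) (b-1) (by omega) (by omega) (by omega) (by omega)
        have e1 : i + 1 + (a - 1) = i + a := by ring
        have e2 : j + 1 + (b - 1) = j + b := by ring
        rwa [e1, e2] at this

theorem Good_Mside (m : List (List Int)) (h_ rows cols i j : Int) :
    Good m h_ i j (Mside m h_ rows cols i j) := by
  induction i, j using Mside.induct m h_ rows cols with
  | case1 i j hc hcell ih1 ih2 ih3 =>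
    rw [Mside, dif_pos hc, if_pos hcell]
    set r1 := Mside m h_ rows cols (i+1) j with hr1
    set r2 := Mside m h_ rows cols i (j+1) with hr2
    set r3 := Mside m h_ rows cols (i+1) (j+1) with hr3
    have hn1 := Mside_nonneg m h_ rows cols (i+1) j
    have hn2 := Mside_nonneg m h_ rows cols i (j+1)
    have hn3 := Mside_nonneg m h_ rows cols (i+1) (j+1)
    rw [← hr1] at hn1; rw [← hr2] at hn2; rw [← hr3] at hn3
    have e : 1 + min r1 (min r2 r3) = min r1 (min r2 r3) + 1 := by ring
    rw [e]
    refine (Good_succ_iff m h_ i j _ ?_).mpr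
      ⟨hcell, Good_mono m h_ (i+1) j r1 _ ?_ ih1, Good_mono m h_ i (j+1) r2 _ ?_ ih2,
        Good_mono m h_ (i+1) (j+1) r3 _ ?_ ih3⟩
    · have := le_min hn1 (le_min hn2 hn3); omega
    · exact min_le_left _ _
    · exact le_trans (min_le_right _ _) (min_le_left _ _)
    · exact le_trans (min_le_right _ _) (min_le_right _ _)
  | case2 i j hc hcell =>
    rw [Mside, dif_pos hc, if_neg hcell]; intro a b ha has hb hbs; omega
  | case3 i j hc =>
    rw [Mside, dif_neg hc]; intro a b ha has hb hbs; omega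

theorem Mside_max (m : List (List Int)) (h_ rows cols : Int) (s : Nat) :
    ∀ i j : Int, (s : Int) ≤ rows - i → (s : Int) ≤ cols - j → Good m h_ i j s →
      (s : Int) ≤ Mside m h_ rows cols i j := by
  induction s with
  | zero =>
    intro i j _ _ _
    simpa using Mside_nonneg m h_ rows cols i j
  | succ s ih =>
    intro i j hr hc hg
    have hcast : ((s+1 : Nat) : Int) = (s : Int) + 1 := by push_cast; ring
    rw [hcast] at hr hc hg ⊢
    have hsn : (0 : Int) ≤ (s : Int) := by positivity
    have hi : i < rows := by omega
    have hj : j < cols := by omega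
    obtain ⟨hcell, hd, hrg, hdg⟩ := (Good_succ_iff m h_ i j (s : Int) hsn).mp hg
    rw [Mside, dif_pos ⟨hi, hj⟩, if_pos hcell]
    have h1 := ih (i+1) j (by omega) (by omega) hd
    have h2 := ih i (j+1) (by omega) (by omega) hrg
    have h3 := ih (i+1) (j+1) (by omega) (by omega) hdg
    have := le_min h1 (le_min h2 h3)
    omega

-- the border scanned by A's two inner for-loops is exactly what extends a good square by one
theorem Good_border_iff (m : List (List Int)) (h_ i j s : Int) (hs : 0 < s)
    (hg : Good m h_ i j s) :
    Good m h_ i j (s+1) ↔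
      ((∀ k : Int, j ≤ k → k < s + j + 1 → h_ ≤ entA m (i+s) k) ∧
       (∀ k : Int, i ≤ k → k < s + i + 1 → h_ ≤ entA m k (j+s))) := by
  constructor
  · intro hg1
    constructor
    · intro k hk1 hk2
      have := hg1 s (k - j) (by omega) (by omega) (by omega) (by omega)
      have e : j + (k - j) = k := by ring
      rwa [e] at this
    · intro k hk1 hk2
      have := hg1 (k - i) s (by omega) (by omega) (by omega) (by omega)
      have e : i + (k - i) = k := by ring
      rwa [e] at this
  · rintro ⟨hbot, hright⟩ a b ha has hb hbs
    by_cases hbs' : b = s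
    · subst hbs'
      exact hright (i + a) (by omega) (by omega)
    · by_cases has' : a = s
      · subst has'
        exact hbot (j + b) (by omega) (by omega)
      · exact hg a b ha (by omega) hb (by omega)

theorem borderFold_iff (m : List (List Int)) (h_ i j s : Int) (flag : Bool) (hs : 0 < s)
    (hg : Good m h_ i j s) (hflag : flag = true) :
    (((PySem.List.pyRange i (s + i + 1) 1).foldl
        (fun f k => if entA m k (j + s) < h_ then false else f)
        ((PySem.List.pyRange j (s + j + 1) 1).foldl
          (fun f k => if entA m (i + s) k < h_ then false else f) flag)) = true)
      ↔ Good m h_ i j (s+1) := by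
  rw [foldl_ifFalse_iff, foldl_ifFalse_iff, Good_border_iff m h_ i j s hs hg]
  constructor
  · rintro ⟨⟨-, h1⟩, h2⟩
    refine ⟨fun k hk1 hk2 => not_lt.mp (h1 k (PySem.List.mem_pyRange_one.mpr ⟨hk1, hk2⟩)), ?_⟩
    exact fun k hk1 hk2 => not_lt.mp (h2 k (PySem.List.mem_pyRange_one.mpr ⟨hk1, hk2⟩))
  · rintro ⟨hbot, hright⟩
    refine ⟨⟨hflag, fun k hk => ?_⟩, fun k hk => ?_⟩
    · obtain ⟨hk1, hk2⟩ := PySem.List.mem_pyRange_one.mp hk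
      exact not_lt.mpr (hbot k hk1 hk2)
    · obtain ⟨hk1, hk2⟩ := PySem.List.mem_pyRange_one.mp hk
      exact not_lt.mpr (hright k hk1 hk2)

theorem alg2Loop_eq (m : List (List Int)) (h_ rows cols i j : Int) :
    ∀ (s : Int) (flag : Bool), flag = true → 1 ≤ s → s ≤ rows - i → s ≤ cols - j →
      Good m h_ i j s →
      alg2Loop m h_ rows cols i j s flag = Mside m h_ rows cols i j := by
  intro s flag
  induction s, flag using alg2Loop.induct m h_ rows cols i j with
  | case1 s flag hc f1 f2 hf2 ih =>
    intro hflag h1 h2 h3 hg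
    rw [alg2Loop, dif_pos hc]
    show (if f2 = true then alg2Loop m h_ rows cols i j (s + 1) f2 else s)
        = Mside m h_ rows cols i j
    rw [if_pos hf2]
    have hg1 : Good m h_ i j (s+1) :=
      (borderFold_iff m h_ i j s flag (by omega) hg hflag).mp hf2
    obtain ⟨hcr, hcc, -⟩ := hc
    exact ih hf2 (by omega) (by omega) (by omega) hg1
  | case2 s flag hc f1 f2 hf2 =>
    intro hflag h1 h2 h3 hg
    rw [alg2Loop, dif_pos hc]
    show (if f2 = true then alg2Loop m h_ rows cols i j (s + 1) f2 else s)
        = Mside m h_ rows cols i j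
    rw [if_neg hf2]
    have hle : s ≤ Mside m h_ rows cols i j := by
      have := Mside_max m h_ rows cols s.toNat i j
        (by omega) (by omega) (by rwa [Int.toNat_of_nonneg (by omega)])
      omega
    have hge : Mside m h_ rows cols i j ≤ s := by
      by_contra hlt
      have hMg := Good_Mside m h_ rows cols i j
      have hg1 : Good m h_ i j (s+1) :=
        Good_mono m h_ i j (Mside m h_ rows cols i j) (s+1) (by omega) hMg
      exact hf2 ((borderFold_iff m h_ i j s flag (by omega) hg hflag).mpr hg1)
    omega
  | case3 s flag hc =>
    intro hflag h1 h2 h3 hg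
    rw [alg2Loop, dif_neg hc]
    have hle : s ≤ Mside m h_ rows cols i j := by
      have := Mside_max m h_ rows cols s.toNat i j
        (by omega) (by omega) (by rwa [Int.toNat_of_nonneg (by omega)])
      omega
    have hr := Mside_le_rows m h_ rows cols i j (by omega)
    have hcc := Mside_le_cols m h_ rows cols i j (by omega)
    have hc' : ¬(s + i < rows ∧ s + j < cols) := fun ⟨u, v⟩ => hc ⟨u, v, hflag⟩
    omega

theorem cell_iff_Mside_pos (m : List (List Int)) (h_ rows cols i j : Int)
    (hi : i < rows) (hj : j < cols) :
    (h_ ≤ entA m i j) ↔ 0 < Mside m h_ rows cols i j := by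
  rw [Mside, dif_pos ⟨hi, hj⟩]
  split_ifs with hcell
  · have n1 := Mside_nonneg m h_ rows cols (i+1) j
    have n2 := Mside_nonneg m h_ rows cols i (j+1)
    have n3 := Mside_nonneg m h_ rows cols (i+1) (j+1)
    have := le_min n1 (le_min n2 n3)
    exact ⟨fun _ => by omega, fun _ => hcell⟩
  · simp [hcell]

theorem buildRow_spec (h_ : Int) (row nxt : List Int) (cols : Nat) (G N : Nat → Int)
    (hG : ∀ jj, jj < cols →
        G jj = if h_ ≤ row.getD jj 0 then 1 + min (N jj) (min (G (jj+1)) (N (jj+1))) else 0)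
    (hGend : ∀ jj, cols ≤ jj → G jj = 0)
    (hN : ∀ jj, jj ≤ cols → nxt.getD jj 0 = N jj) :
    ∀ j, j ≤ cols → ∀ t, (buildRow h_ row nxt cols j).getD t 0 =
      (if j + t ≤ cols then G (j+t) else 0) := by
  intro j
  induction j using buildRow.induct h_ row nxt cols with
  | case1 j hj ih =>
    intro _ t
    rw [buildRow, dif_pos hj]
    match t with
    | 0 =>
      simp only [List.getD_cons_zero, add_zero, if_pos (by omega : j ≤ cols)]
      rw [hG j hj]
      have hrest0 : (buildRow h_ row nxt cols (j+1)).headD 0 = G (j+1) := by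
        rw [headD_eq_getD_zero, ih (by omega) 0]
        simp [hj]
      rw [hrest0, hN j (by omega), hN (j+1) (by omega)]
    | Nat.succ t =>
      simp only [List.getD_cons_succ]
      rw [ih (by omega) t]
      have e : j + 1 + t = j + (t + 1) := by omega
      rw [e]
  | case2 j hj =>
    intro hjc t
    rw [buildRow, dif_neg hj]
    match t with
    | 0 =>
      have hle : j + 0 ≤ cols := by omega
      simp [hGend j (by omega)]
    | Nat.succ t =>
      rw [if_neg (by omega)]
      simp [List.getD]

theorem dp_spec (m : List (List Int)) (h_ rows cols : Int)
    (hrows : rows = (m.length : Int)) :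
    ∀ d k jj : Nat,
      (((m.drop d).foldr (fun row acc =>
          buildRow h_ row (acc.headD (List.replicate (cols.toNat + 1) 0)) cols.toNat 0 :: acc) []).getD k []).getD jj 0
        = Mside m h_ rows cols ((d : Int) + (k : Int)) (jj : Int) := by
  subst hrows
  suffices H : ∀ n : Nat, ∀ d, m.length - d = n → ∀ k jj : Nat,
      (((m.drop d).foldr (fun row acc =>
          buildRow h_ row (acc.headD (List.replicate (cols.toNat + 1) 0)) cols.toNat 0 :: acc) []).getD k []).getD jj 0
        = Mside m h_ (m.length : Int) cols ((d : Int) + (k : Int)) (jj : Int) by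
    intro d k jj; exact H (m.length - d) d rfl k jj
  intro n
  induction n with
  | zero =>
    intro d hd k jj
    rw [List.drop_eq_nil_of_le (by omega)]
    rw [Mside, dif_neg (by omega)]
    simp
  | succ n ih =>
    intro d hd k jj
    have hdlt : d < m.length := by omega
    rw [List.drop_eq_getElem_cons hdlt, List.foldr_cons]
    match k with
    | Nat.succ k' =>
      simp only [List.getD_cons_succ]
      rw [ih (d+1) (by omega) k' jj]
      have e : ((d+1 : Nat) : Int) + (k' : Int) = (d : Int) + ((k'.succ : Nat) : Int) := by
        push_cast; ring
      rw [e]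
    | 0 =>
      simp only [List.getD_cons_zero]
      have hrow := buildRow_spec h_ (m[d]'hdlt)
        (((m.drop (d+1)).foldr (fun row acc =>
            buildRow h_ row (acc.headD (List.replicate (cols.toNat + 1) 0)) cols.toNat 0 :: acc)
          []).headD (List.replicate (cols.toNat + 1) 0)) cols.toNat
        (fun t => Mside m h_ (m.length : Int) cols (d : Int) (t : Int))
        (fun t => Mside m h_ (m.length : Int) cols ((d : Int) + 1) (t : Int))
        ?hG ?hGend ?hN 0 (by omega) jj
      case hG =>
        intro t ht
        beta_reduce
        have hent : entA m (d : Int) (t : Int) = (m[d]'hdlt).getD t 0 := by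
          simp only [entA, PySem.List.pyGetD_natCast]
          rw [List.getD_eq_getElem m [] hdlt]
        rw [Mside, dif_pos ⟨by omega, by omega⟩, hent]
        push_cast
        rfl
      case hGend =>
        intro t ht
        beta_reduce
        rw [Mside, dif_neg (by omega)]
      case hN =>
        intro t ht
        beta_reduce
        cases hdp : (m.drop (d+1)).foldr (fun row acc =>
            buildRow h_ row (acc.headD (List.replicate (cols.toNat + 1) 0)) cols.toNat 0 :: acc) [] with
        | nil =>
          have hnil : m.length ≤ d + 1 := by
            by_contra hlt
            rw [List.drop_eq_getElem_cons (by omega), List.foldr_cons] at hdp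
            exact (List.cons_ne_nil _ _) hdp
          rw [Mside, dif_neg (by omega)]
          simp only [List.headD_nil]
          simp [List.getD_eq_getElem?_getD, List.getElem?_replicate]
          split <;> rfl
        | cons x xs =>
          simp only [List.headD_cons]
          have hx := ih (d+1) (by omega) 0 t
          rw [hdp] at hx
          simp only [List.getD_cons_zero] at hx
          have e : ((d+1 : Nat) : Int) + ((0 : Nat) : Int) = (d : Int) + 1 := by push_cast; ring
          rw [e] at hx
          exact hx
      rw [hrow]
      by_cases hcase : 0 + jj ≤ cols.toNat
      · rw [if_pos hcase]; simp
      · rw [if_neg hcase]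
        rw [Mside, dif_neg (by omega)]

theorem scan_eq (m : List (List Int)) (h_ rows cols : Int) (hrows : rows = (m.length : Int)) :
    (PySem.List.pyRange 0 rows 1).foldl (fun st i =>
      (PySem.List.pyRange 0 cols 1).foldl (fun st j =>
        if h_ ≤ entA m i j then
          let squareSize := alg2Loop m h_ rows cols i j 1 true
          if st.1 ≤ squareSize then
            (squareSize, some (i+1), some (j+1), some (i+squareSize), some (j+squareSize))
          else st
        else st) st) ((0 : Int), (none : Option Int), (none : Option Int), (none : Option Int), (none : Option Int))
    = (PySem.List.pyRange 0 rows 1).foldl (fun st i =>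
      (PySem.List.pyRange 0 cols 1).foldl (fun st j =>
        let s := PySem.List.pyGetD (PySem.List.pyGetD (m.foldr (fun row acc =>
            buildRow h_ row (acc.headD (List.replicate (cols.toNat + 1) 0)) cols.toNat 0 :: acc) []) i []) j 0
        if 0 < s ∧ st.1 ≤ s then
          (s, some (i+1), some (j+1), some (i+s), some (j+s))
        else st) st) ((0 : Int), (none : Option Int), (none : Option Int), (none : Option Int), (none : Option Int)) := by
  apply PySem.List.foldl_congr_mem
  intro st i hi
  obtain ⟨hi0, hilt⟩ := PySem.List.mem_pyRange_one.mp hi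
  apply PySem.List.foldl_congr_mem
  intro st j hj
  obtain ⟨hj0, hjlt⟩ := PySem.List.mem_pyRange_one.mp hj
  obtain ⟨ni, rfl⟩ : ∃ n : Nat, i = (n : Int) := ⟨i.toNat, (Int.toNat_of_nonneg hi0).symm⟩
  obtain ⟨nj, rfl⟩ : ∃ n : Nat, j = (n : Int) := ⟨j.toNat, (Int.toNat_of_nonneg hj0).symm⟩
  have hdp : PySem.List.pyGetD (PySem.List.pyGetD (m.foldr (fun row acc =>
      buildRow h_ row (acc.headD (List.replicate (cols.toNat + 1) 0)) cols.toNat 0 :: acc) []) (ni : Int) []) (nj : Int) 0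
      = Mside m h_ rows cols (ni : Int) (nj : Int) := by
    simp only [PySem.List.pyGetD_natCast]
    have := dp_spec m h_ rows cols hrows 0 ni nj
    simpa using this
  by_cases hcell : h_ ≤ entA m (ni : Int) (nj : Int)
  · rw [if_pos hcell]
    have hgood1 : Good m h_ (ni : Int) (nj : Int) 1 := by
      intro a b ha ha1 hb hb1
      have ha' : a = 0 := by omega
      have hb' : b = 0 := by omega
      subst ha'; subst hb'
      simpa using hcell
    have hs : alg2Loop m h_ rows cols (ni : Int) (nj : Int) 1 true
        = Mside m h_ rows cols (ni : Int) (nj : Int) :=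
      alg2Loop_eq m h_ rows cols (ni : Int) (nj : Int) 1 true rfl le_rfl (by omega) (by omega) hgood1
    have hpos : 0 < Mside m h_ rows cols (ni : Int) (nj : Int) :=
      (cell_iff_Mside_pos m h_ rows cols (ni : Int) (nj : Int) hilt hjlt).mp hcell
    simp only [hdp, hs]
    by_cases hst : st.1 ≤ Mside m h_ rows cols (ni : Int) (nj : Int)
    · rw [if_pos hst, if_pos ⟨hpos, hst⟩]
    · rw [if_neg hst, if_neg (fun hcon => hst hcon.2)]
  · rw [if_neg hcell]
    have hz : ¬ (0 < Mside m h_ rows cols (ni : Int) (nj : Int)) :=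
      fun hp => hcell ((cell_iff_Mside_pos m h_ rows cols (ni : Int) (nj : Int) hilt hjlt).mpr hp)
    simp only [hdp]
    rw [if_neg (fun hcon => hz hcon.1)]

-- ===== VERDICT (by name: the statement is the Claim_ definition above) =====
theorem alg2_spec : Claim_equal_alg2 := by
  unfold Claim_equal_alg2
  intro matrix h_ _hdom _hpre
  unfold Spec_alg2 alg2 alg2_alt
  exact congrArg (fun st : Int × Option Int × Option Int × Option Int × Option Int =>
    [st.2.1, st.2.2.1, st.2.2.2.1, st.2.2.2.2])
    (scan_eq matrix h_ (matrix.length : Int)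
      (if 0 < matrix.length then ((matrix.headD []).length : Int) else 0) rfl)
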